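-- pv_equiv track=rewrite | github.com/BRKME/LP_Wallet_Tracker | config.py | get_current_plan
-- ===== SOURCE A (Python) =====
-- MONTHLY_PLAN = {
--     "2025-01": 5000,
--     "2025-02": 6000,
--     "2025-03": 7000,
--     "2025-04": 8000,
--     "2025-05": 9000,
--     "2025-06": 10000,
--     "2025-07": 11000,
--     "2025-08": 12000,
--     "2025-09": 13000,
--     "2025-10": 14000,
--     "2025-11": 15000,
--     "2025-12": 16000,
--     "2026-01": 17000,
--     "2026-02": 18000,
--     "2026-03": 19000,
--     "2026-04": 20000,
--     "2026-05": 21000,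
--     "2026-06": 22000,
--     "2026-07": 23000,
--     "2026-08": 24000,
--     "2026-09": 25000,
--     "2026-10": 26000,
--     "2026-11": 27000,
--     "2026-12": 28000,
-- }
--
-- def get_current_plan(year_month: str) -> int:
--     """Get plan for current month, or latest available"""
--     if year_month in MONTHLY_PLAN:
--         return MONTHLY_PLAN[year_month]
--     # Return last known plan if month not configured
--     sorted_months = sorted(MONTHLY_PLAN.keys())
--     for month in reversed(sorted_months):
--         if month <= year_month:
--             return MONTHLY_PLAN[month]
--     return 0
-- ===== SOURCE B (Python) =====
-- MONTHLY_PLAN = {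
--     "2025-01": 5000,
--     "2025-02": 6000,
--     "2025-03": 7000,
--     "2025-04": 8000,
--     "2025-05": 9000,
--     "2025-06": 10000,
--     "2025-07": 11000,
--     "2025-08": 12000,
--     "2025-09": 13000,
--     "2025-10": 14000,
--     "2025-11": 15000,
--     "2025-12": 16000,
--     "2026-01": 17000,
--     "2026-02": 18000,
--     "2026-03": 19000,
--     "2026-04": 20000,
--     "2026-05": 21000,
--     "2026-06": 22000,
--     "2026-07": 23000,
--     "2026-08": 24000,
--     "2026-09": 25000,
--     "2026-10": 26000,
--     "2026-11": 27000,
--     "2026-12": 28000,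
-- }
--
-- def get_current_plan(year_month: str) -> int:
--     """Get plan for current month, or latest available"""
--     # single pass: keep the best (largest) key <= year_month seen so far, with its value
--     best = None
--     for k, v in MONTHLY_PLAN.items():
--         if k <= year_month and (best is None or best[0] < k):
--             best = (k, v)
--     return best[1] if best is not None else 0
-- ===== Notes on version B (the rewrite author's own statement) =====
-- stated objective: alternative
-- what changed: Replaced the membership check plus sort-then-reverse-scan with a single pass over the dict items keeping a best-so-far (largest key <= year_month, with its value) accumulator; no sort, no membership branch and no final lookup.
import Mathlib
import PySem

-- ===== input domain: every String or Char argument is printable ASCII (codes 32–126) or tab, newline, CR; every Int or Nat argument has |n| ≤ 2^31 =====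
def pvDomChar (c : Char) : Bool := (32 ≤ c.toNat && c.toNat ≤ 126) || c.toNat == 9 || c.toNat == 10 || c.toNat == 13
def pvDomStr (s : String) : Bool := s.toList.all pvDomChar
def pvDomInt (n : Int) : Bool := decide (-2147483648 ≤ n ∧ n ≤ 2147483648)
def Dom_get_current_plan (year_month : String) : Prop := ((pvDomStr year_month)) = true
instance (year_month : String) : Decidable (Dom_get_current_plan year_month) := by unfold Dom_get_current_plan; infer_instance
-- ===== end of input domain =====

-- B replaces A's membership check plus sort-and-reverse-scan with one pass over the dict items
-- keeping a best-so-far (largest key ≤ year_month, with its value) accumulator (objective: alternative).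

-- module constant shared by both programs
def MONTHLY_PLAN : PySem.Dict String Int := PySem.Dict.ofList [
  ("2025-01", 5000), ("2025-02", 6000), ("2025-03", 7000), ("2025-04", 8000),
  ("2025-05", 9000), ("2025-06", 10000), ("2025-07", 11000), ("2025-08", 12000),
  ("2025-09", 13000), ("2025-10", 14000), ("2025-11", 15000), ("2025-12", 16000),
  ("2026-01", 17000), ("2026-02", 18000), ("2026-03", 19000), ("2026-04", 20000),
  ("2026-05", 21000), ("2026-06", 22000), ("2026-07", 23000), ("2026-08", 24000),
  ("2026-09", 25000), ("2026-10", 26000), ("2026-11", 27000), ("2026-12", 28000)]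

-- ===== PORT A =====
-- the 'for month in reversed(sorted_months): if month <= year_month: return MONTHLY_PLAN[month]' loop;
-- 'MONTHLY_PLAN[month]' is ported as getD 0: month is drawn from the dict's own keys, so KeyError is impossible
def pvScanA : List String → String → Int
  | [], _ => 0
  | m :: rest, ym =>
      if m ≤ ym then PySem.Dict.getD MONTHLY_PLAN m 0
      else pvScanA rest ym

def get_current_plan (year_month : String) : Int :=
  -- 'if year_month in MONTHLY_PLAN: return MONTHLY_PLAN[year_month]'
  match PySem.Dict.get? MONTHLY_PLAN year_month with
  | some v => v
  | none =>
      -- sorted_months = sorted(MONTHLY_PLAN.keys())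
      pvScanA (PySem.List.sorted (PySem.Dict.keys MONTHLY_PLAN) (fun x => x) false).reverse year_month

-- ===== PORT B =====
-- the loop body: 'if k <= year_month and (best is None or best[0] < k): best = (k, v)'
def pvStepB (ym : String) (best : Option (String × Int)) (p : String × Int) : Option (String × Int) :=
  if p.1 ≤ ym ∧ (match best with | none => true | some b => decide (b.1 < p.1)) = true then some p else best

def get_current_plan_alt (year_month : String) : Int :=
  -- 'best = None; for k, v in MONTHLY_PLAN.items(): …'
  match (PySem.Dict.items MONTHLY_PLAN).foldl (pvStepB year_month) none with
  | some b => b.2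
  | none => 0   -- 'return best[1] if best is not None else 0'

-- ===== PRECONDITION & SPEC =====
def Spec_get_current_plan (year_month : String) (out : Int) : Prop := out = get_current_plan_alt year_month
instance (year_month : String) (out : Int) : Decidable (Spec_get_current_plan year_month out) := by unfold Spec_get_current_plan; infer_instance

-- ===== CLAIM (what is proved, stated in full; the proofs are below) =====
def Claim_equal_get_current_plan : Prop := ∀ (year_month : String), Dom_get_current_plan year_month → Spec_get_current_plan year_month (get_current_plan year_month)

-- ===== LEMMAS AND PROOFS =====

-- A's loop is 'first element of the list satisfying ≤ ym, looked up (0 if none)'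
theorem pvScanA_eq_find? (l : List String) (ym : String) :
    pvScanA l ym =
      match l.find? (fun k => decide (k ≤ ym)) with
      | some m => PySem.Dict.getD MONTHLY_PLAN m 0
      | none => 0 := by
  induction l with
  | nil => rfl
  | cons a t ih =>
      simp only [pvScanA]
      by_cases h : a ≤ ym
      · have hf : List.find? (fun k => decide (k ≤ ym)) (a :: t) = some a :=
          List.find?_cons_of_pos (by simp [h])
        rw [if_pos h, hf]
      · have hf : List.find? (fun k => decide (k ≤ ym)) (a :: t) =
            List.find? (fun k => decide (k ≤ ym)) t :=
          List.find?_cons_of_neg (by simp [h])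
        rw [if_neg h, hf, ih]

-- first match in the reversed list = last match in the list
theorem find?_reverse_eq_getLast?_filter (p : String → Bool) (l : List String) :
    l.reverse.find? p = (l.filter p).getLast? := by
  induction l using List.reverseRecOn with
  | nil => rfl
  | append_singleton l a ih =>
      rw [show (l ++ [a]).reverse = a :: l.reverse by simp]
      by_cases h : p a = true
      · rw [List.find?_cons_of_pos h, List.filter_append,
          show List.filter p [a] = [a] by simp [h], List.getLast?_concat]
      · have h' : p a = false := eq_false_of_ne_true h
        rw [List.find?_cons_of_neg (by simp [h']), ih, List.filter_append]
        simp [h']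

-- the keys of the plan table, strictly increasing
theorem keys_pairwise_lt : (PySem.Dict.keys MONTHLY_PLAN).Pairwise (· < ·) := by
  have h : (PySem.Dict.keys MONTHLY_PLAN).Pairwise (fun a b => a.toList < b.toList) := by decide
  exact h.imp (fun {a b} hab => String.lt_iff_toList_lt.mpr hab)

-- the keys are already sorted
theorem sorted_keys_eq :
    PySem.List.sorted (PySem.Dict.keys MONTHLY_PLAN) (fun x => x) false = PySem.Dict.keys MONTHLY_PLAN :=
  PySem.List.sorted_eq_of_perm_of_pairwise_lt _ _ _ (List.Perm.refl _) keys_pairwise_lt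

-- elements of getLast? are members
theorem pvLastMem {α : Type} {l : List α} {q : α} (h : l.getLast? = some q) : q ∈ l := by
  rcases List.mem_getLast?_eq_getLast (l := l) (x := q) (by rw [h]; rfl) with ⟨hne, heq⟩
  rw [heq]; exact List.getLast_mem hne

-- if ym itself is a key, the last key ≤ ym is ym
theorem getLast?_filter_of_mem (l : List String) (ym : String)
    (hp : l.Pairwise (· < ·)) (hmem : ym ∈ l) :
    (l.filter (fun k => decide (k ≤ ym))).getLast? = some ym := by
  induction l with
  | nil => cases hmem
  | cons a t ih =>
      rcases List.pairwise_cons.mp hp with ⟨ha, ht⟩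
      rcases List.mem_cons.mp hmem with rfl | hyt
      · have hft : t.filter (fun k => decide (k ≤ ym)) = [] := by
          apply List.filter_eq_nil_iff.mpr
          intro x hx
          simpa using not_le.mpr (ha x hx)
        have hf : List.filter (fun k => decide (k ≤ ym)) (ym :: t) =
            ym :: List.filter (fun k => decide (k ≤ ym)) t :=
          List.filter_cons_of_pos (by simp)
        rw [hf, hft]
        rfl
      · have haym : a ≤ ym := le_of_lt (ha ym hyt)
        have hrec := ih ht hyt
        have hne : t.filter (fun k => decide (k ≤ ym)) ≠ [] := by
          intro h; rw [h] at hrec; cases hrec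
        have hf : List.filter (fun k => decide (k ≤ ym)) (a :: t) =
            a :: List.filter (fun k => decide (k ≤ ym)) t :=
          List.filter_cons_of_pos (by simp [haym])
        rw [hf,
          show a :: t.filter (fun k => decide (k ≤ ym)) = [a] ++ t.filter (fun k => decide (k ≤ ym)) from rfl,
          List.getLast?_append_of_ne_nil _ hne]
        exact hrec

-- B's fold invariant: over a run of items whose keys all exceed the accumulator's key and are
-- strictly increasing, the fold returns the last qualifying item (or the accumulator if none)
theorem foldl_stepB_eq (ym : String) (l : List (String × Int)) (acc : Option (String × Int))
    (hinc : (l.map Prod.fst).Pairwise (· < ·))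
    (hacc : ∀ b, acc = some b → ∀ p ∈ l, b.1 < p.1) :
    l.foldl (pvStepB ym) acc =
      match (l.filter (fun p => decide (p.1 ≤ ym))).getLast? with
      | some p => some p
      | none => acc := by
  induction l generalizing acc with
  | nil => rfl
  | cons p t ih =>
      rw [List.map_cons, List.pairwise_cons] at hinc
      obtain ⟨ha, hinc'⟩ := hinc
      have hpt : ∀ q ∈ t, p.1 < q.1 := fun q hq => ha q.1 (List.mem_map_of_mem hq)
      by_cases h : p.1 ≤ ym
      · have hstep : pvStepB ym acc p = some p := by
          unfold pvStepB
          cases hc : acc with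
          | none => simp [h]
          | some b => exact if_pos ⟨h, by simpa using hacc b hc p (by simp)⟩
        rw [List.foldl_cons, hstep,
          ih (some p) hinc' (by intro b hb q hq; cases hb; exact hpt q hq),
          List.filter_cons_of_pos (by simp [h])]
        cases hft : t.filter (fun p => decide (p.1 ≤ ym)) with
        | nil => simp
        | cons q t' =>
            rw [show p :: q :: t' = [p] ++ q :: t' from rfl,
              List.getLast?_append_of_ne_nil _ (by simp)]
            cases hl : (q :: t').getLast? with
            | none => exact absurd (List.getLast?_eq_none_iff.mp hl) (by simp)
            | some r => rfl
      · have hstep : pvStepB ym acc p = acc := by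
          unfold pvStepB
          exact if_neg (fun hc => h hc.1)
        rw [List.foldl_cons, hstep,
          ih acc hinc' (fun b hb q hq => hacc b hb q (by simp [hq])),
          List.filter_cons_of_neg (by simp [h])]

-- keys-filter is the fst-image of items-filter
theorem filter_keys_eq_map_filter_items (ym : String) :
    (PySem.Dict.keys MONTHLY_PLAN).filter (fun k => decide (k ≤ ym)) =
      ((PySem.Dict.items MONTHLY_PLAN).filter (fun p => decide (p.1 ≤ ym))).map Prod.fst := by
  rw [show PySem.Dict.keys MONTHLY_PLAN = (PySem.Dict.items MONTHLY_PLAN).map Prod.fst from rfl,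
    List.filter_map]
  rfl

theorem a_eq_b (ym : String) : get_current_plan ym = get_current_plan_alt ym := by
  have hnodup : (PySem.Dict.keys MONTHLY_PLAN).Nodup := keys_pairwise_lt.nodup
  unfold get_current_plan get_current_plan_alt
  rw [sorted_keys_eq, pvScanA_eq_find?, find?_reverse_eq_getLast?_filter,
    foldl_stepB_eq ym _ none keys_pairwise_lt (by intro b hb; cases hb),
    filter_keys_eq_map_filter_items, List.getLast?_map]
  cases hg : PySem.Dict.get? MONTHLY_PLAN ym with
  | none =>
      cases hft : ((PySem.Dict.items MONTHLY_PLAN).filter (fun p => decide (p.1 ≤ ym))).getLast? with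
      | none => rfl
      | some q =>
          have hq_mem : q ∈ PySem.Dict.items MONTHLY_PLAN :=
            (List.mem_filter.mp (pvLastMem hft)).1
          simp [PySem.Dict.getD_of_mem_items MONTHLY_PLAN (show (q.1, q.2) ∈ _ by simpa using hq_mem) hnodup 0]
  | some v =>
      -- ym is a key, so the last qualifying item has key ym and its value is v
      have hmemk : ym ∈ PySem.Dict.keys MONTHLY_PLAN := by
        by_contra hk
        rw [(PySem.Dict.get?_eq_none_iff_not_mem_keys MONTHLY_PLAN ym).mpr hk] at hg
        cases hg
      have hklast : ((PySem.Dict.keys MONTHLY_PLAN).filter (fun k => decide (k ≤ ym))).getLast? = some ym :=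
        getLast?_filter_of_mem _ ym keys_pairwise_lt hmemk
      rw [filter_keys_eq_map_filter_items, List.getLast?_map] at hklast
      cases hft : ((PySem.Dict.items MONTHLY_PLAN).filter (fun p => decide (p.1 ≤ ym))).getLast? with
      | none => rw [hft] at hklast; cases hklast
      | some q =>
          rw [hft] at hklast
          have hq1 : q.1 = ym := by simpa using hklast
          have hq_mem : q ∈ PySem.Dict.items MONTHLY_PLAN :=
            (List.mem_filter.mp (pvLastMem hft)).1
          have hq2 : PySem.Dict.get? MONTHLY_PLAN ym = some q.2 := by
            rw [← hq1]
            exact PySem.Dict.get?_of_mem_items MONTHLY_PLAN (show (q.1, q.2) ∈ _ by simpa using hq_mem) hnodup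
          rw [hg] at hq2
          simpa using hq2

-- ===== VERDICT (by name: the statement is the Claim_ definition above) =====
theorem get_current_plan_spec : Claim_equal_get_current_plan := by
  intro ym _
  unfold Spec_get_current_plan
  exact a_eq_b ym
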